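-- pv_equiv track=rewrite | github.com/HadiAyyach/python-codes | CoderHub/Easy/التحقق من الحروف.py | allSameCase
-- ===== SOURCE A (Python) =====
-- def allSameCase(word: str) -> bool:
--     alphabet = 'qwertyuiopasdfghjklzxcvbnm'
--     counter = 0
--     for i in word :
--         if i in alphabet :
--             counter += 1
--         else :
--             counter += 10
--     return counter == len(word) or counter == len(word)*10
-- ===== SOURCE B (Python) =====
-- def allSameCase(word: str) -> bool:
--     alphabet = 'qwertyuiopasdfghjklzxcvbnm'
--     has_lower = any(c in alphabet for c in word)
--     has_other = any(c not in alphabet for c in word)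
--     return not (has_lower and has_other)
-- ===== Notes on version B (the rewrite author's own statement) =====
-- stated objective: simpler
-- what changed: Replaced the weighted counter (1 per lowercase letter, 10 per other char, then comparing against len and 10*len) by two boolean any() aggregates: the string is accepted iff it does not mix a lowercase letter with a non-lowercase character.
import Mathlib
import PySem

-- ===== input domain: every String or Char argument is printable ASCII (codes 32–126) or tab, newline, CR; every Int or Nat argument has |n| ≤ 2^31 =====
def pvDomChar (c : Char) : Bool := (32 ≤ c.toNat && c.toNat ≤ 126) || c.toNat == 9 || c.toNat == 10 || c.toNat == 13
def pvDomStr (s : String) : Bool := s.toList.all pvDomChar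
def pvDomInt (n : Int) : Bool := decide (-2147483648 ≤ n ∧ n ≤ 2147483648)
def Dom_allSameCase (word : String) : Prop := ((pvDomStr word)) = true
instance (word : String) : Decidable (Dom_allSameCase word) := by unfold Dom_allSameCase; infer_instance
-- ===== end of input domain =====

-- B replaces A's weighted counter (1 per lowercase letter, 10 per other char, compared
-- against len and 10*len) by two boolean any() aggregates; objective: simpler.


-- ===== PORT A =====
-- 'i in alphabet' with i a single char = character membership in the alphabet's chars (exact here)
def allSameCase (word : String) : Bool :=
  let alphabet : List Char := "qwertyuiopasdfghjklzxcvbnm".toList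
  let counter : Int := word.toList.foldl
    (fun counter i => if alphabet.contains i then counter + 1 else counter + 10) 0
  counter == PySem.Str.len word || counter == PySem.Str.len word * 10

-- ===== PORT B =====
def allSameCase_alt (word : String) : Bool :=
  let alphabet : List Char := "qwertyuiopasdfghjklzxcvbnm".toList
  let hasLower := word.toList.any (fun c => alphabet.contains c)
  let hasOther := word.toList.any (fun c => !alphabet.contains c)
  !(hasLower && hasOther)

-- ===== PRECONDITION & SPEC =====
def Spec_allSameCase (word : String) (out : Bool) : Prop := out = allSameCase_alt word
instance (word : String) (out : Bool) : Decidable (Spec_allSameCase word out) := by unfold Spec_allSameCase; infer_instance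

-- ===== CLAIM (what is proved, stated in full; the proofs are below) =====
def Claim_equal_allSameCase : Prop := ∀ (word : String), Dom_allSameCase word → Spec_allSameCase word (allSameCase word)

-- ===== LEMMAS AND PROOFS =====

-- The counter loop computes acc + (#lowercase) + 10 * (#other).
theorem counter_foldl (al : List Char) (l : List Char) (acc : Int) :
    l.foldl (fun counter i => if al.contains i then counter + 1 else counter + 10) acc
      = acc + (l.countP (fun c => al.contains c) : Int)
            + 10 * (l.countP (fun c => !al.contains c) : Int) := by
  induction l generalizing acc with
  | nil => simp
  | cons x xs ih =>
    simp only [List.foldl_cons, List.countP_cons, ih]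
    by_cases h : x ∈ al <;> simp [h] <;> omega

-- length splits into lowercase count + other count
theorem length_split (al : List Char) (l : List Char) :
    l.length = l.countP (fun c => al.contains c) + l.countP (fun c => !al.contains c) := by
  induction l with
  | nil => simp
  | cons x xs ih =>
    rw [List.length_cons, List.countP_cons, List.countP_cons, ih]
    by_cases h : x ∈ al <;> simp [h] <;> omega

theorem allSameCase_spec : Claim_equal_allSameCase := by
  intro word _
  unfold Spec_allSameCase allSameCase allSameCase_alt
  simp only [counter_foldl, PySem.Str.len_eq]
  set l := word.toList with hl
  set al := "qwertyuiopasdfghjklzxcvbnm".toList with hal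
  have hlen := length_split al l
  have hany : ∀ p : Char → Bool, l.any p = decide (0 < l.countP p) := by
    intro p
    rcases h : l.any p with _ | _
    · simp only [List.any_eq_false] at h
      have : l.countP p = 0 := List.countP_eq_zero.mpr h
      simp [this]
    · rw [List.any_eq_true] at h
      have h2 : 0 < l.countP p := by
        rcases h with ⟨x, hx, hpx⟩
        exact List.countP_pos_iff.mpr ⟨x, hx, hpx⟩
      simp [h2]
  rw [hany, hany]
  set a := l.countP (fun c => al.contains c)
  set b := l.countP (fun c => !al.contains c)
  by_cases ha : 0 < a <;> by_cases hb : 0 < b <;>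
    simp [ha, hb, beq_iff_eq] <;> omega
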